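-- pv_equiv track=rewrite | github.com/erodedrocks/slurmcpu | donotcommittestfile.py | closestspeedup
-- ===== SOURCE A (Python) =====
-- def closestspeedup(speedupdict, threshold):
--     sortedvallist = sorted(list(speedupdict.values()))
--     pastkey = "n"
--     for val in sortedvallist:
--         if val >= threshold:
--             return pastkey
--         for key in speedupdict.keys():
--             if speedupdict[key] == val:
--                 pastkey = key
--     for key in speedupdict.keys():
--         if speedupdict[key] == sortedvallist[-1]:
--             return key
--     return -1
-- ===== SOURCE B (Python) =====
-- def closestspeedup(speedupdict, threshold):
--     below = [v for v in speedupdict.values() if v < threshold]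
--     if len(below) == len(speedupdict):
--         # nothing reaches the threshold: the first key holding the overall maximum
--         best = max(speedupdict.values())
--         return next(k for k, v in speedupdict.items() if v == best)
--     if not below:
--         return "n"
--     # some value reaches the threshold: the last key holding the largest value below it
--     best = max(below)
--     result = "n"
--     for key, val in speedupdict.items():
--         if val == best:
--             result = key
--     return result
-- ===== Notes on version B (the rewrite author's own statement) =====
-- stated objective: simpler
-- what changed: A sorts the value list and rescans every key for each sorted value (plus a final key scan); B computes the below-threshold values once, takes their max, and picks the matching key in a single scan (first key when nothing reaches the threshold, last key otherwise, exactly A's tie-break rules).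
-- outside the precondition, e.g. on closestspeedup({}, 0): A returns -1, B raises ValueError
import Mathlib
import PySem

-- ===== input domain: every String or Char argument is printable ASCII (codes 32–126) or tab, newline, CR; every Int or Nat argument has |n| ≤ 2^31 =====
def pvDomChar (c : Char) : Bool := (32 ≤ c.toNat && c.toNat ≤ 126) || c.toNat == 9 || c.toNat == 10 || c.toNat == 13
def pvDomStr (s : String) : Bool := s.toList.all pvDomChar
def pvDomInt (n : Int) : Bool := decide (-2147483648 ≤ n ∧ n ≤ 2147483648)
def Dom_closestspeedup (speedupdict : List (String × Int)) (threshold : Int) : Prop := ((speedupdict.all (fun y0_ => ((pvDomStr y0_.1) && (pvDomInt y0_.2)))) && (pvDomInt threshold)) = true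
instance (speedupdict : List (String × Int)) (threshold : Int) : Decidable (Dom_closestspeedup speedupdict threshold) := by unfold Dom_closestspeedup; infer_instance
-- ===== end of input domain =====

-- B replaces A's sort + per-value key rescans by computing the below-threshold maximum once and one key
-- scan (measurably faster; same values and tie-breaks as A on every nonempty dict; return value only).

-- ===== PORT A =====
-- second loop of A: 'for key in speedupdict.keys(): if speedupdict[key] == sortedvallist[-1]: return key'
def pvFinalA (d : PySem.Dict String Int) (svl : List Int) : List String → String
  | [] => ""          -- Python: 'return -1', not a String; only reachable on the empty dict, excluded by Pre_
  | k :: rest =>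
    match PySem.List.pyGet? svl (-1) with
    | none => ""      -- IndexError (unreachable: keys nonempty → values nonempty)
    | some lastv => if d.getD k 0 == lastv then k else pvFinalA d svl rest

-- outer loop of A over the sorted value list, carrying pastkey; falls through to the second loop
def pvOuterA (d : PySem.Dict String Int) (threshold : Int) (svl : List Int) : List Int → String → String
  | [], _pastkey => pvFinalA d svl d.keys
  | v :: rest, pastkey =>
    if threshold ≤ v then pastkey
    else pvOuterA d threshold svl rest
      (d.keys.foldl (fun pk k => if d.getD k 0 == v then k else pk) pastkey)

def closestspeedup (speedupdict : List (String × Int)) (threshold : Int) : String :=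
  let d := PySem.Dict.ofList speedupdict
  let sortedvallist := PySem.List.sorted d.values (fun x => x) false
  pvOuterA d threshold sortedvallist sortedvallist "n"

-- ===== PORT B =====
def closestspeedup_alt (speedupdict : List (String × Int)) (threshold : Int) : String :=
  let d := PySem.Dict.ofList speedupdict
  let below := d.values.filter (fun v => decide (v < threshold))
  if below.length = d.items.length then
    match PySem.List.max? d.values (fun x => x) with
    | none => "n"   -- Python: max([]) raises ValueError (empty dict only; outside Pre_)
    | some best => ((d.items.find? (fun p => p.2 == best)).map Prod.fst).getD "n"
      -- 'next(...)': getD is unreachable (best is a value of some item)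
  else if below = [] then "n"
  else
    match PySem.List.max? below (fun x => x) with
    | none => "n"   -- unreachable: below ≠ []
    | some best => d.items.foldl (fun r p => if p.2 == best then p.1 else r) "n"

-- ===== PRECONDITION & SPEC =====
-- Pre_ excludes only the empty dict, on which A returns the int -1 — not a value of the String return type.
def Pre_closestspeedup (speedupdict : List (String × Int)) (threshold : Int) : Prop :=
  speedupdict ≠ []
instance (speedupdict : List (String × Int)) (threshold : Int) : Decidable (Pre_closestspeedup speedupdict threshold) := by unfold Pre_closestspeedup; infer_instance

def pvWitness_closestspeedup : (List (String × Int)) × Int := ([("a", 1)], 5)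

def Spec_closestspeedup (speedupdict : List (String × Int)) (threshold : Int) (out : String) : Prop := out = closestspeedup_alt speedupdict threshold
instance (speedupdict : List (String × Int)) (threshold : Int) (out : String) : Decidable (Spec_closestspeedup speedupdict threshold out) := by unfold Spec_closestspeedup; infer_instance

-- ===== CLAIM (what is proved, stated in full; the proofs are below) =====
def Claim_equal_closestspeedup : Prop := ∀ (speedupdict : List (String × Int)) (threshold : Int), Dom_closestspeedup speedupdict threshold → Pre_closestspeedup speedupdict threshold → Spec_closestspeedup speedupdict threshold (closestspeedup speedupdict threshold)

-- ===== LEMMAS AND PROOFS =====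

-- the largest value, default 0 (only used to state A's characterisation)
def pvMaxVal (l : List (String × Int)) : Int := ((l.map Prod.snd).max?).getD 0

theorem pv_pyGet_neg_one {α : Type} (xs : List α) (h : xs ≠ []) :
    PySem.List.pyGet? xs (-1) = some (xs.getLast h) := by
  have hlen : 0 < xs.length := List.length_pos_iff.mpr h
  simp only [PySem.List.pyGet?, PySem.List.pyIdx?]
  rw [if_neg (by omega), if_pos (by push_cast; omega)]
  simp only [Option.bind_some]
  have : (1 : Int).toNat = 1 := rfl
  rw [List.getLast_eq_getElem, List.getElem?_eq_getElem (by omega)]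
  simp

theorem pv_le_getLast (l : List Int) (h : l ≠ []) (hp : l.Pairwise (· ≤ ·)) :
    ∀ x ∈ l, x ≤ l.getLast h := by
  induction l with
  | nil => simp
  | cons a l ih =>
    intro x hx
    cases l with
    | nil => simp at hx; simp [hx]
    | cons b l' =>
      rw [List.getLast_cons (by simp)]
      rcases List.mem_cons.mp hx with rfl | hx' 
      · exact List.rel_of_pairwise_cons hp (List.getLast_mem _)
      · exact ih (by simp) hp.of_cons x hx'

theorem pv_foldl_lastmatch {α β : Type} (l : List α) (f : α → Bool) (g : α → β) (init : β) :
    l.foldl (fun acc x => if f x then g x else acc) init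
      = ((l.reverse.find? f).map g).getD init := by
  induction l generalizing init with
  | nil => rfl
  | cons x xs ih =>
    simp only [List.foldl_cons, List.reverse_cons, List.find?_append, ih]
    cases hfx : f x <;> cases hfind : xs.reverse.find? f <;> simp [List.find?, hfx]

theorem pv_innerA (d : PySem.Dict String Int) (hnd : d.keys.Nodup) (v : Int) (pk : String) :
    d.keys.foldl (fun pk k => if d.getD k 0 == v then k else pk) pk
      = ((d.items.reverse.find? (fun p => p.2 == v)).map Prod.fst).getD pk := by
  have hk : d.keys = d.items.map Prod.fst := rfl
  rw [hk, List.foldl_map]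
  have hcg := PySem.List.foldl_congr_mem d.items
    (fun pk (p : String × Int) => if d.getD p.1 0 == v then p.1 else pk)
    (fun pk (p : String × Int) => if p.2 == v then p.1 else pk) pk ?_
  · rw [hcg]
    exact pv_foldl_lastmatch d.items (fun p => p.2 == v) Prod.fst pk
  · intro acc p hp
    have hg : d.getD p.1 0 = p.2 :=
      PySem.Dict.getD_of_mem_items d (by simpa using hp) hnd 0
    simp only [hg]

theorem pv_outerA_below (d : PySem.Dict String Int) (t : Int) (svl vs rest : List Int) (pk : String)
    (h : ∀ v ∈ vs, v < t) :
    pvOuterA d t svl (vs ++ rest) pk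
      = pvOuterA d t svl rest
          (vs.foldl (fun pk v => d.keys.foldl (fun pk k => if d.getD k 0 == v then k else pk) pk) pk) := by
  induction vs generalizing pk with
  | nil => rfl
  | cons v vs ih =>
    have hv : ¬ t ≤ v := not_le.mpr (h v (by simp))
    rw [List.cons_append]
    simp only [pvOuterA, if_neg hv, List.foldl_cons]
    exact ih _ (fun w hw => h w (by simp [hw]))

theorem pv_chain (d : PySem.Dict String Int) (hnd : d.keys.Nodup) (vs : List Int) (pk : String)
    (hvs : vs ≠ []) (hmem : ∀ v ∈ vs, ∃ p ∈ d.items, p.2 = v) :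
    ∃ a, d.items.reverse.find? (fun p => p.2 == vs.getLast hvs) = some a ∧
      vs.foldl (fun pk v => d.keys.foldl (fun pk k => if d.getD k 0 == v then k else pk) pk) pk = a.1 := by
  induction vs generalizing pk with
  | nil => exact absurd rfl hvs
  | cons v vs ih =>
    cases vs with
    | nil =>
      obtain ⟨p, hp, hpv⟩ := hmem v (by simp)
      have hsome : (d.items.reverse.find? (fun q => q.2 == v)).isSome = true :=
        List.find?_isSome.mpr ⟨p, List.mem_reverse.mpr hp, by simp [hpv]⟩
      obtain ⟨a, ha⟩ := Option.isSome_iff_exists.mp hsome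
      refine ⟨a, by simpa using ha, ?_⟩
      simp only [List.foldl_cons, List.foldl_nil]
      rw [pv_innerA d hnd v pk, ha]
      rfl
    | cons w vs' =>
      simp only [List.foldl_cons]
      obtain ⟨a, ha, hfold⟩ := ih
        (d.keys.foldl (fun pk k => if d.getD k 0 == v then k else pk) pk)
        (by simp) (fun u hu => hmem u (by simp [hu]))
      refine ⟨a, ?_, ?_⟩
      · rw [List.getLast_cons (by simp)]; exact ha
      · simpa using hfold

theorem pv_finalA_char (d : PySem.Dict String Int) (svl : List Int) (ps : List (String × Int))
    (h : ∀ p ∈ ps, d.getD p.1 0 = p.2) (lastv : Int)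
    (hget : PySem.List.pyGet? svl (-1) = some lastv) :
    pvFinalA d svl (ps.map Prod.fst)
      = ((ps.find? (fun p => p.2 == lastv)).map Prod.fst).getD "" := by
  induction ps with
  | nil => rfl
  | cons p ps ih =>
    simp only [List.map_cons, pvFinalA, hget, h p (by simp)]
    cases hpl : (p.2 == lastv) <;>
      simp [List.find?, hpl, ih (fun q hq => h q (by simp [hq]))]

theorem pv_A_char (d : PySem.Dict String Int) (t : Int) (hnd : d.keys.Nodup) (hne : d.items ≠ []) :
    pvOuterA d t (PySem.List.sorted d.values (fun x => x) false)
        (PySem.List.sorted d.values (fun x => x) false) "n"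
      = if ∃ v ∈ d.items.map Prod.snd, t ≤ v then
          (match ((d.items.map Prod.snd).filter (fun v => decide (v < t))).max? with
           | none => "n"
           | some m => ((d.items.reverse.find? (fun p => p.2 == m)).map Prod.fst).getD "n")
        else ((d.items.find? (fun p => p.2 == pvMaxVal d.items)).map Prod.fst).getD "" := by
  have hv : d.values = d.items.map Prod.snd := rfl
  set svl := PySem.List.sorted d.values (fun x => x) false with hsvl
  have hperm : svl.Perm (d.items.map Prod.snd) := by
    simpa [hv] using PySem.List.sorted_perm d.values (fun x => x) false
  have hpair : svl.Pairwise (· ≤ ·) := PySem.List.sorted_pairwise d.values (fun x => x)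
  set P : Int → Bool := fun v => decide (v < t) with hP
  have hsplit : svl.takeWhile P ++ svl.dropWhile P = svl := List.takeWhile_append_dropWhile
  set TL := svl.takeWhile P with hTL
  set TH := svl.dropWhile P with hTHdef
  have hTLlt : ∀ v ∈ TL, v < t := fun v hv => by simpa [hP] using List.mem_takeWhile_imp hv
  have hsvlne : svl ≠ [] := by
    intro hnil
    have hlen := hperm.length_eq
    rw [hnil] at hlen
    simp at hlen
    exact hne (List.length_eq_zero_iff.mp hlen.symm)
  have hTLpair : TL.Pairwise (· ≤ ·) := List.Pairwise.sublist (List.takeWhile_sublist P) hpair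
  cases hTHc : TH with
  | nil =>
    have hsvleq : TL = svl := by rw [← hsplit, hTHc, List.append_nil]
    have hall : ∀ v ∈ svl, v < t := fun v hv => hTLlt v (hsvleq ▸ hv)
    have hcond : ¬ ∃ v ∈ d.items.map Prod.snd, t ≤ v := by
      rintro ⟨v, hvm, htv⟩
      exact absurd (hall v (hperm.mem_iff.mpr hvm)) (not_lt.mpr htv)
    rw [if_neg hcond]
    rw [show pvOuterA d t svl svl "n" = pvOuterA d t svl (svl ++ []) "n" from by rw [List.append_nil]]
    rw [pv_outerA_below d t svl svl [] "n" hall]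
    show pvFinalA d svl d.keys = _
    have hget := pv_pyGet_neg_one svl hsvlne
    have hkeys : d.keys = d.items.map Prod.fst := rfl
    rw [hkeys, pv_finalA_char d svl d.items
      (fun p hp => PySem.Dict.getD_of_mem_items d (by simpa using hp) hnd 0)
      (svl.getLast hsvlne) hget]
    have hmax : (d.items.map Prod.snd).max? = some (svl.getLast hsvlne) := by
      rw [List.max?_eq_some_iff]
      exact ⟨hperm.mem_iff.mp (List.getLast_mem _),
        fun b hb => pv_le_getLast svl hsvlne hpair b (hperm.mem_iff.mpr hb)⟩
    have hMV : pvMaxVal d.items = svl.getLast hsvlne := by rw [pvMaxVal, hmax]; rfl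
    rw [hMV]
  | cons hd H' =>
    have hTHne : TH ≠ [] := by simp [hTHc]
    have hth : t ≤ hd := by
      have h0 : P (TH.head hTHne) = false := List.head_dropWhile_not P (w := hTHne)
      simp [hTHc, hP] at h0
      omega
    have hTHmem : hd ∈ svl := by
      rw [← hsplit, hTHc]; simp
    have hcond : ∃ v ∈ d.items.map Prod.snd, t ≤ v :=
      ⟨hd, hperm.mem_iff.mp hTHmem, hth⟩
    rw [if_pos hcond]
    rw [show pvOuterA d t svl svl "n" = pvOuterA d t svl (TL ++ TH) "n" from by rw [hsplit]]
    rw [hTHc, pv_outerA_below d t svl TL (hd :: H') "n" hTLlt]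
    simp only [pvOuterA, if_pos hth]
    -- TH elements all ≥ t (needed for filter TH = [])
    have hpairTLTH : (TL ++ TH).Pairwise (· ≤ ·) := by rw [hsplit]; exact hpair
    have hTHge : ∀ v ∈ TH, t ≤ v := by
      have hTHpair : TH.Pairwise (· ≤ ·) := (List.pairwise_append.mp hpairTLTH).2.1
      intro v hvm
      rw [hTHc] at hvm hTHpair
      rcases List.mem_cons.mp hvm with rfl | hv'
      · exact hth
      · exact le_trans hth (List.rel_of_pairwise_cons hTHpair hv')
    have hfTL : svl.filter P = TL := by
      rw [← hsplit, List.filter_append,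
        List.filter_eq_self.mpr (fun a ha => by simpa [hP] using hTLlt a ha),
        List.filter_eq_nil_iff.mpr (fun a ha => by simp [hP]; exact hTHge a ha),
        List.append_nil]
    have hpermF : ((d.items.map Prod.snd).filter P).Perm TL := by
      rw [← hfTL]; exact (hperm.filter P).symm
    cases hTLc : TL with
    | nil =>
      have hfnil : (d.items.map Prod.snd).filter P = [] := by
        have := hpermF.length_eq
        rw [hTLc] at this
        exact List.length_eq_zero_iff.mp (by simpa using this)
      rw [hfnil]
      rfl
    | cons x TL' =>
      have hTLne : TL ≠ [] := by simp [hTLc]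
      obtain ⟨a, ha, hfold⟩ := pv_chain d hnd TL "n" hTLne
        (fun u hu => by
          have : u ∈ d.items.map Prod.snd := hperm.mem_iff.mp ((List.takeWhile_sublist P).mem hu)
          obtain ⟨p, hp, hpu⟩ := List.mem_map.mp this
          exact ⟨p, hp, hpu⟩)
      have hmaxF : ((d.items.map Prod.snd).filter P).max? = some (TL.getLast hTLne) := by
        rw [List.max?_eq_some_iff]
        exact ⟨hpermF.mem_iff.mpr (List.getLast_mem _),
          fun b hb => pv_le_getLast TL hTLne hTLpair b (hpermF.mem_iff.mp hb)⟩
      rw [hmaxF]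
      rw [← hTLc]
      rw [show (TL.foldl (fun pk v => d.keys.foldl (fun pk k => if d.getD k 0 == v then k else pk) pk) "n") = a.1 from hfold]
      show a.1 = ((d.items.reverse.find? (fun p => p.2 == TL.getLast hTLne)).map Prod.fst).getD "n"
      rw [ha]
      rfl

theorem pv_items_ne (sd : List (String × Int)) (hpre : sd ≠ []) :
    (PySem.Dict.ofList sd).items ≠ [] := by
  intro hnil
  have hk0 : (PySem.Dict.ofList sd).keys = [] := by
    show ((PySem.Dict.ofList sd).items.map Prod.fst) = []
    rw [hnil]; rfl
  have h1 : PySem.Dict.ofList sd = List.foldl (fun d (x : String × Int) => d.insert x.1 x.2) PySem.Dict.empty sd := rfl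
  have hk : (PySem.Dict.ofList sd).keys
      = PySem.Set.update (PySem.Dict.empty : PySem.Dict String Int).keys (sd.map Prod.fst) := by
    rw [h1]
    exact PySem.Dict.keys_foldl_insert_key sd Prod.fst (fun _ x => x.2) PySem.Dict.empty
  rw [PySem.Dict.keys_empty] at hk
  have hupd : PySem.Set.update ([] : List String) (sd.map Prod.fst) = PySem.Set.ofList (sd.map Prod.fst) := by
    rw [PySem.Set.ofList_eq_foldl]; rfl
  rw [hupd] at hk
  cases sd with
  | nil => exact hpre rfl
  | cons q sd' =>
    have : q.1 ∈ PySem.Set.ofList ((q :: sd').map Prod.fst) :=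
      (PySem.Set.mem_ofList _ _).mpr (by simp)
    rw [← hk, hk0] at this
    exact absurd this (List.not_mem_nil)

theorem pv_pymax_eq (xs : List Int) : PySem.List.max? xs (fun x => x) = xs.max? := by
  cases xs with
  | nil => rfl
  | cons x t => rw [PySem.List.max?_id_cons]; rfl

theorem pv_main_eq (sd : List (String × Int)) (t : Int) (hpre : sd ≠ []) :
    closestspeedup sd t = closestspeedup_alt sd t := by
  have hnd := PySem.Dict.nodup_keys_ofList sd
  have hne := pv_items_ne sd hpre
  have hv : (PySem.Dict.ofList sd).values = (PySem.Dict.ofList sd).items.map Prod.snd := rfl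
  show pvOuterA (PySem.Dict.ofList sd) t
      (PySem.List.sorted (PySem.Dict.ofList sd).values (fun x => x) false)
      (PySem.List.sorted (PySem.Dict.ofList sd).values (fun x => x) false) "n"
    = closestspeedup_alt sd t
  rw [pv_A_char _ t hnd hne]
  have hB : closestspeedup_alt sd t =
      (if (((PySem.Dict.ofList sd).items.map Prod.snd).filter (fun v => decide (v < t))).length
            = (PySem.Dict.ofList sd).items.length then
        match PySem.List.max? ((PySem.Dict.ofList sd).items.map Prod.snd) (fun x => x) with
        | none => "n"
        | some best => (((PySem.Dict.ofList sd).items.find? (fun p => p.2 == best)).map Prod.fst).getD "n"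
      else if ((PySem.Dict.ofList sd).items.map Prod.snd).filter (fun v => decide (v < t)) = [] then "n"
      else
        match PySem.List.max? (((PySem.Dict.ofList sd).items.map Prod.snd).filter (fun v => decide (v < t))) (fun x => x) with
        | none => "n"
        | some best => (PySem.Dict.ofList sd).items.foldl (fun r p => if p.2 == best then p.1 else r) "n") := rfl
  rw [hB]
  by_cases hall : ∀ v ∈ (PySem.Dict.ofList sd).items.map Prod.snd, v < t
  · have hnex : ¬ ∃ v ∈ (PySem.Dict.ofList sd).items.map Prod.snd, t ≤ v := by
      rintro ⟨v, hvm, htv⟩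
      exact absurd (hall v hvm) (not_lt.mpr htv)
    rw [if_neg hnex]
    have hflt : ((PySem.Dict.ofList sd).items.map Prod.snd).filter (fun v => decide (v < t))
        = (PySem.Dict.ofList sd).items.map Prod.snd :=
      List.filter_eq_self.mpr (fun a ha => by simpa using hall a ha)
    rw [hflt, if_pos (by rw [List.length_map]), pv_pymax_eq]
    cases hmm : ((PySem.Dict.ofList sd).items.map Prod.snd).max? with
    | none => exact absurd (List.map_eq_nil_iff.mp (List.max?_eq_none_iff.mp hmm)) hne
    | some m =>
      have hMV : pvMaxVal (PySem.Dict.ofList sd).items = m := by rw [pvMaxVal, hmm]; rfl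
      rw [hMV]
      show ((List.find? (fun q => q.2 == m) (PySem.Dict.ofList sd).items).map Prod.fst).getD ""
        = ((List.find? (fun q => q.2 == m) (PySem.Dict.ofList sd).items).map Prod.fst).getD "n"
      obtain ⟨p, hp, hpm⟩ := List.mem_map.mp (List.max?_eq_some_iff.mp hmm).1
      have hsome : (List.find? (fun q => q.2 == m) (PySem.Dict.ofList sd).items).isSome = true :=
        List.find?_isSome.mpr ⟨p, hp, by show (p.2 == m) = true; rw [hpm]; exact beq_self_eq_true m⟩
      obtain ⟨a, ha⟩ := Option.isSome_iff_exists.mp hsome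
      rw [ha]
      rfl
  · have hex : ∃ v ∈ (PySem.Dict.ofList sd).items.map Prod.snd, t ≤ v := by
      rcases not_forall.mp hall with ⟨v, hv'⟩
      rcases _root_.not_imp.mp hv' with ⟨hvm, hlt⟩
      exact ⟨v, hvm, not_lt.mp hlt⟩
    rw [if_pos hex]
    have hlenne : (((PySem.Dict.ofList sd).items.map Prod.snd).filter
        (fun v => decide (v < t))).length ≠ (PySem.Dict.ofList sd).items.length := by
      intro hlen
      apply hall
      intro v hvm
      have := List.length_filter_eq_length_iff.mp (by rw [hlen, List.length_map]) v hvm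
      simpa using this
    rw [if_neg hlenne]
    by_cases hbe : ((PySem.Dict.ofList sd).items.map Prod.snd).filter (fun v => decide (v < t)) = []
    · rw [if_pos hbe, hbe]
      rfl
    · rw [if_neg hbe, pv_pymax_eq]
      cases hbm : (((PySem.Dict.ofList sd).items.map Prod.snd).filter (fun v => decide (v < t))).max? with
      | none => exact absurd (List.max?_eq_none_iff.mp hbm) hbe
      | some best =>
        show ((List.find? (fun p => p.2 == best) (PySem.Dict.ofList sd).items.reverse).map Prod.fst).getD "n"
          = (PySem.Dict.ofList sd).items.foldl (fun r p => if p.2 == best then p.1 else r) "n"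
        rw [pv_foldl_lastmatch (PySem.Dict.ofList sd).items (fun p => p.2 == best) Prod.fst "n"]

-- ===== VERDICT (by name: the statement is the Claim_ definition above) =====
theorem closestspeedup_spec : Claim_equal_closestspeedup := by
  intro sd t _hdom hpre
  exact pv_main_eq sd t hpre
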